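-- pv_equiv track=rewrite | github.com/YueLi28/electric_substation_drawer | venv/Utility.py | match32Feature
-- ===== SOURCE A (Python) =====
-- def match32Feature(eles):
--     cleanEles = [x for x in eles if "CN" not in x]
--     if len(cleanEles) % 3 != 0:
--         return False
--     for i in range(0, len(cleanEles),3):
--         if "Disconnector" in cleanEles[i] and "Disconnector" in cleanEles[i+2] and "Breaker" in cleanEles[i+1]:
--             continue
--         else:
--             return False
--     return True
-- ===== SOURCE B (Python) =====
-- def match32Feature(eles):
--     # Column-wise check: element at filtered position i must contain PATTERN[i % 3];
--     # no triple grouping or stepped indexing.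
--     PATTERN = ("Disconnector", "Breaker", "Disconnector")
--     clean = [x for x in eles if "CN" not in x]
--     return len(clean) % 3 == 0 and all(PATTERN[i % 3] in x for i, x in enumerate(clean))
-- ===== Notes on version B (the rewrite author's own statement) =====
-- stated objective: simpler
-- what changed: Replaces A's stepped index loop over triples (reading positions i, i+2, i+1 of the filtered list) by a single enumerate pass that classifies each element by its index mod 3 against a fixed pattern tuple, plus the length-divisibility test; no triple grouping or index arithmetic beyond i % 3 remains.
import Mathlib
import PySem

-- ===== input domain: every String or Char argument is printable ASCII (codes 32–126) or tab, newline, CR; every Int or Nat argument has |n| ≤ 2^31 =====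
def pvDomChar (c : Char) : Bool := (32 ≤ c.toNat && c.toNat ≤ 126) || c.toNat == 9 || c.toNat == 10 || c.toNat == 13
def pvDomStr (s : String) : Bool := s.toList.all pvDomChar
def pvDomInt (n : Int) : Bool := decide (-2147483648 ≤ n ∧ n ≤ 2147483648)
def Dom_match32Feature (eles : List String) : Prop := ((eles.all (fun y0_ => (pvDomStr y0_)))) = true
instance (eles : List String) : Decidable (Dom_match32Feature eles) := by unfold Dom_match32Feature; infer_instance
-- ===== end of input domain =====

-- B replaces A's stepped triple loop by one enumerate pass that checks each filtered element
-- against a fixed pattern selected by its index mod 3 (different decomposition; same cost).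

-- ===== PORT A =====
-- 'for i in range(0, len(cleanEles), 3): …' with early return False; under the %3 guard every
-- index i, i+1, i+2 is in range, so pyGetD's default "" is never consulted.
def pvALoop (xs : List String) : List Int → Bool
  | [] => true
  | i :: rest =>
    if PySem.Str.isIn "Disconnector" (PySem.List.pyGetD xs i "") &&
       PySem.Str.isIn "Disconnector" (PySem.List.pyGetD xs (i+2) "") &&
       PySem.Str.isIn "Breaker" (PySem.List.pyGetD xs (i+1) "")
    then pvALoop xs rest
    else false

def match32Feature (eles : List String) : Bool :=
  let cleanEles := eles.filter (fun x => !(PySem.Str.isIn "CN" x))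
  if cleanEles.length % 3 ≠ 0 then false
  else pvALoop cleanEles (PySem.List.pyRange 0 (cleanEles.length : Int) 3)

-- ===== PORT B =====
-- Source B's PATTERN[i % 3]: tuple indexing by the Python-mod of the enumerate index.
def pvPat (i : Int) : String :=
  if PySem.Int.mod i 3 = 0 then "Disconnector"
  else if PySem.Int.mod i 3 = 1 then "Breaker"
  else "Disconnector"

-- 'len(clean) % 3 == 0 and all(PATTERN[i % 3] in x for i, x in enumerate(clean))'
def match32Feature_alt (eles : List String) : Bool :=
  let clean := eles.filter (fun x => !(PySem.Str.isIn "CN" x))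
  decide (clean.length % 3 = 0) &&
    (PySem.List.enumerate clean 0).all (fun p => PySem.Str.isIn (pvPat p.1) p.2)

-- ===== PRECONDITION & SPEC =====
def Spec_match32Feature (eles : List String) (out : Bool) : Prop := out = match32Feature_alt eles
instance (eles : List String) (out : Bool) : Decidable (Spec_match32Feature eles out) := by unfold Spec_match32Feature; infer_instance

-- ===== CLAIM (what is proved, stated in full; the proofs are below) =====
def Claim_equal_match32Feature : Prop := ∀ (eles : List String), Dom_match32Feature eles → Spec_match32Feature eles (match32Feature eles)

-- ===== LEMMAS AND PROOFS =====

-- proof-only intermediate: the common triple-shape of both programs on the filtered list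
def pvBGo : List String → Bool
  | [] => true
  | a :: b :: c :: rest =>
    PySem.Str.isIn "Disconnector" a && PySem.Str.isIn "Breaker" b &&
    PySem.Str.isIn "Disconnector" c && pvBGo rest
  | _ => false

-- range(a, b, 3) unrolls one element at a time when a < b
lemma pyRange3_cons (a b : Int) (h : a < b) :
    PySem.List.pyRange a b 3 = a :: PySem.List.pyRange (a + 3) b 3 := by
  rw [PySem.List.pyRange_of_pos a b (by norm_num),
      PySem.List.pyRange_of_pos (a + 3) b (by norm_num)]
  have h3 : ((b - a + 3 - 1) / 3).toNat = ((b - (a + 3) + 3 - 1) / 3).toNat + 1 := by omega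
  rw [if_pos h, h3, List.range_succ_eq_map, List.map_cons, List.map_map]
  by_cases h' : a + 3 < b
  · rw [if_pos h']
    simp only [Nat.cast_zero, mul_zero, add_zero, List.cons.injEq, true_and]
    apply List.map_congr_left
    intro k _
    simp only [Function.comp_apply]
    push_cast
    ring
  · rw [if_neg h']
    have h0 : ((b - (a + 3) + 3 - 1) / 3).toNat = 0 := by omega
    rw [h0]
    simp

lemma pvBGo_not_dvd (xs : List String) (h : ¬ (3 ∣ xs.length)) : pvBGo xs = false := by
  match xs with
  | [] => simp at h
  | [_] => rfl
  | [_, _] => rfl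
  | a :: b :: c :: rest =>
    have hr : ¬ (3 ∣ rest.length) := by simp at h ⊢; omega
    simp [pvBGo, pvBGo_not_dvd rest hr]

-- the Bool algebra of one A-loop iteration: A tests (D-left ∧ D-right ∧ Breaker)
lemma boolTriple (x y z w : Bool) : (if x && z && y then w else false) = (x && y && z && w) := by
  cases x <;> cases y <;> cases z <;> simp

lemma pvALoop_eq_pvBGo (xs pre : List String) (h : 3 ∣ xs.length) :
    pvALoop (pre ++ xs) (PySem.List.pyRange (pre.length : Int) ((pre.length + xs.length : Nat) : Int) 3)
      = pvBGo xs := by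
  match xs with
  | [] =>
    rw [PySem.List.pyRange_of_pos _ _ (by norm_num)]
    simp [pvALoop, pvBGo]
  | [_] => exact absurd h (by simp)
  | [_, _] => exact absurd h (by simp)
  | a :: b :: c :: rest =>
    have hd : 3 ∣ rest.length := by
      simp only [List.length_cons] at h; omega
    have hlt : (pre.length : Int) < ((pre.length + (a :: b :: c :: rest).length : Nat) : Int) := by
      simp; omega
    rw [pyRange3_cons _ _ hlt]
    have g0 : PySem.List.pyGetD (pre ++ a :: b :: c :: rest) (pre.length : Int) "" = a := by
      rw [PySem.List.pyGetD_natCast]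
      simp
    have g1 : PySem.List.pyGetD (pre ++ a :: b :: c :: rest) ((pre.length : Int) + 1) "" = b := by
      have e : (pre.length : Int) + 1 = ((pre.length + 1 : Nat) : Int) := by push_cast; ring
      rw [e, PySem.List.pyGetD_natCast]
      rw [List.getD_eq_getElem?_getD, List.getElem?_append_right (by omega)]
      simp
    have g2 : PySem.List.pyGetD (pre ++ a :: b :: c :: rest) ((pre.length : Int) + 2) "" = c := by
      have e : (pre.length : Int) + 2 = ((pre.length + 2 : Nat) : Int) := by push_cast; ring
      rw [e, PySem.List.pyGetD_natCast]
      rw [List.getD_eq_getElem?_getD, List.getElem?_append_right (by omega)]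
      simp
    have key := pvALoop_eq_pvBGo rest (pre ++ [a, b, c]) hd
    have key2 : pvALoop (pre ++ a :: b :: c :: rest)
        (PySem.List.pyRange ((pre.length : Int) + 3)
          ((pre.length + (a :: b :: c :: rest).length : Nat) : Int) 3) = pvBGo rest := by
      have e1 : pre ++ [a, b, c] ++ rest = pre ++ a :: b :: c :: rest := by simp
      have e2 : (((pre ++ [a, b, c]).length : Nat) : Int) = (pre.length : Int) + 3 := by
        simp
        try omega
      have e3 : (((pre ++ [a, b, c]).length + rest.length : Nat) : Int)
          = ((pre.length + (a :: b :: c :: rest).length : Nat) : Int) := by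
        simp
        try omega
      rw [e1, e2, e3] at key
      exact key
    show (if _ then _ else false) = _
    rw [g0, g1, g2, key2]
    show (if _ then _ else false) = pvBGo _
    simp only [pvBGo]
    exact boolTriple _ _ _ _

lemma goal_eq (xs : List String) :
    (if xs.length % 3 ≠ 0 then false
     else pvALoop xs (PySem.List.pyRange 0 (xs.length : Int) 3)) = pvBGo xs := by
  by_cases h : xs.length % 3 = 0
  · have key := pvALoop_eq_pvBGo xs [] (by omega)
    simp only [List.nil_append, List.length_nil, Nat.cast_zero, Nat.zero_add] at key
    simp only [h, ne_eq, not_true_eq_false, if_false]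
    simpa using key
  · rw [if_pos h, pvBGo_not_dvd xs (by omega)]

-- pvPat at the three residues of a nonnegative base 3*k
lemma pvPat0 (k : Nat) : pvPat (3 * (k : Int)) = "Disconnector" := by
  have : PySem.Int.mod (3 * (k : Int)) 3 = 0 := by
    rw [PySem.Int.mod_eq_emod_of_pos (by norm_num : (0:Int) < 3)]; omega
  unfold pvPat; rw [this]; norm_num

lemma pvPat1 (k : Nat) : pvPat (3 * (k : Int) + 1) = "Breaker" := by
  have : PySem.Int.mod (3 * (k : Int) + 1) 3 = 1 := by
    rw [PySem.Int.mod_eq_emod_of_pos (by norm_num : (0:Int) < 3)]; omega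
  unfold pvPat; rw [this]; norm_num

lemma pvPat2 (k : Nat) : pvPat (3 * (k : Int) + 2) = "Disconnector" := by
  have : PySem.Int.mod (3 * (k : Int) + 2) 3 = 2 := by
    rw [PySem.Int.mod_eq_emod_of_pos (by norm_num : (0:Int) < 3)]; omega
  unfold pvPat; rw [this]; norm_num

lemma boolShuffle (d x y z w : Bool) :
    (d && (x && (y && (z && w)))) = (x && (y && (z && (d && w)))) := by
  cases d <;> cases x <;> cases y <;> cases z <;> simp

-- B's enumerate pass, started at any base 3*k, equals the triple-shape recursion
lemma enumAll_eq_pvBGo (xs : List String) (k : Nat) :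
    (decide (xs.length % 3 = 0) &&
      (PySem.List.enumerate xs (3 * (k : Int))).all (fun p => PySem.Str.isIn (pvPat p.1) p.2))
      = pvBGo xs := by
  match xs with
  | [] => simp [pvBGo, PySem.List.enumerate_nil]
  | [x] => simp [pvBGo]
  | [x, y] => simp [pvBGo]
  | a :: b :: c :: rest =>
    have ih := enumAll_eq_pvBGo rest (k + 1)
    have e3 : (3 * (k : Int)) + 1 + 1 + 1 = 3 * ((k + 1 : Nat) : Int) := by push_cast; ring
    have e2 : (3 * (k : Int)) + 1 + 1 = 3 * (k : Int) + 2 := by ring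
    rw [PySem.List.enumerate_cons, PySem.List.enumerate_cons, PySem.List.enumerate_cons, e3, e2]
    simp only [List.all_cons]
    rw [pvPat0 k, pvPat1 k, pvPat2 k]
    have hlen : decide ((a :: b :: c :: rest).length % 3 = 0)
        = decide (rest.length % 3 = 0) := by
      simp only [List.length_cons]
      by_cases h : rest.length % 3 = 0
      · rw [decide_eq_true (by omega), decide_eq_true h]
      · rw [decide_eq_false (by omega), decide_eq_false h]
    rw [hlen, boolShuffle, ih]
    simp [pvBGo, Bool.and_assoc]

-- ===== VERDICT (by name: the statement is the Claim_ definition above) =====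
theorem match32Feature_spec : Claim_equal_match32Feature := by
  intro eles _
  unfold Spec_match32Feature match32Feature match32Feature_alt
  have hB := enumAll_eq_pvBGo (eles.filter (fun x => !(PySem.Str.isIn "CN" x))) 0
  simp only [Nat.cast_zero, mul_zero] at hB
  rw [goal_eq, ← hB]
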